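-- pv_equiv track=rewrite | github.com/was1a1fairy/algorithms | hw2.py | reverse_even_elements
-- ===== SOURCE A (Python) =====
-- def reverse_even_elements(arr:list[int]) -> list:
--
--     if not isinstance(arr, list):  raise TypeError
--
--     start = 0
--     end = 0
--     list_even = [elem for elem in arr if elem%2==0]
--     length = len(arr)
--
--     for i in range(len(list_even)//2):
--         while arr[i+start] % 2 != 0:
--             start +=1
--         while arr[length-1-i-end] % 2 != 0:
--             end += 1
--         if i + start == length-1-i-end:
--             return arr
--         arr[i+start], arr[length-1-i-end] = arr[length-1-i-end], arr[i+start]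
--
--     # O(n^2)
--     return arr
-- ===== SOURCE B (Python) =====
-- def reverse_even_elements(arr: list[int]) -> list:
--
--     if not isinstance(arr, list):  raise TypeError
--
--     positions = [i for i, x in enumerate(arr) if x % 2 == 0]
--     vals = [arr[p] for p in positions]
--     for p, v in zip(positions, reversed(vals)):
--         arr[p] = v
--
--     return arr
-- ===== Notes on version B (the rewrite author's own statement) =====
-- stated objective: simpler
-- what changed: Replaces A's inward two-pointer swap loop (with per-iteration while-scans for the next even element from each end) by a one-pass index table: collect the positions of even elements, then write the even values back in reversed order.
import Mathlib
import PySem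

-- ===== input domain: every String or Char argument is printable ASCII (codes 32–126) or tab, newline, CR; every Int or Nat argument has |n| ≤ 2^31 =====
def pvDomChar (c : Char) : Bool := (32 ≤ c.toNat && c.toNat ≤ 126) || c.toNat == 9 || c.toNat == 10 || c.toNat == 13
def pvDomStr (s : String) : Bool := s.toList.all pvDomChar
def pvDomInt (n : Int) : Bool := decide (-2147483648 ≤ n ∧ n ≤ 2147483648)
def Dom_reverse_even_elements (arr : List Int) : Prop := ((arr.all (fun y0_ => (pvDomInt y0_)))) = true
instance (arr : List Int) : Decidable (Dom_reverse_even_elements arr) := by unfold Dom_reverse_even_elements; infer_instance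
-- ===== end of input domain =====

-- B replaces A's inward two-pointer swap loop by an index table of even positions with a reversed
-- write-back (objective: simpler).  Both Pythons mutate `arr` in place and return it; the theorems
-- here are about the returned value (which is also the final state of `arr` in both).

-- ===== PORT A =====
-- `x % 2 == 0` (Python `%`); shared by both ports.
def pvEven (x : Int) : Bool := PySem.Int.mod x 2 == 0

-- `while arr[j] % 2 != 0: j += 1` — returns the first index ≥ j holding an even value.
-- Fuel-bounded; on an out-of-range index Python raises IndexError (the loop never reaches
-- that state on any input, so the `none`/fuel-exhaustion fallbacks are unreachable).
def pvScanUp (a : List Int) (j : Int) : Nat → Int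
  | 0 => j
  | f + 1 =>
    match PySem.List.pyGet? a j with
    | some v => if pvEven v then j else pvScanUp a (j + 1) f
    | none => j

-- `while arr[j] % 2 != 0: j -= 1` (A writes the index as length-1-i-end and increments end).
def pvScanDown (a : List Int) (j : Int) : Nat → Int
  | 0 => j
  | f + 1 =>
    match PySem.List.pyGet? a j with
    | some v => if pvEven v then j else pvScanDown a (j - 1) f
    | none => j

-- A's `for i in range(len(list_even)//2)` loop with its persistent start/end offsets;
-- the early `return arr` when the two indices meet is the `if p = q then a` branch.
def pvLoopA (a : List Int) (n : Int) : Nat → Int → Int → Int → List Int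
  | 0, _, _, _ => a
  | c + 1, i, start, endv =>
    let p := pvScanUp a (i + start) (a.length + 1)
    let q := pvScanDown a (n - 1 - i - endv) (a.length + 1)
    if p = q then a
    else
      pvLoopA (PySem.List.pySetD (PySem.List.pySetD a p (PySem.List.pyGetD a q 0)) q
                (PySem.List.pyGetD a p 0)) n c (i + 1) (p - i) (n - 1 - i - q)

def reverse_even_elements (arr : List Int) : List Int :=
  let list_even := arr.filter pvEven
  let length : Int := arr.length
  pvLoopA arr length (list_even.length / 2) 0 0 0

-- ===== PORT B =====
def reverse_even_elements_alt (arr : List Int) : List Int :=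
  let positions := ((PySem.List.enumerate arr).filter (fun ix => pvEven ix.2)).map (fun ix => ix.1)
  let vals := positions.map (fun p => PySem.List.pyGetD arr p 0)
  (positions.zip vals.reverse).foldl (fun a pv => PySem.List.pySetD a pv.1 pv.2) arr

-- ===== PRECONDITION & SPEC =====
def Spec_reverse_even_elements (arr : List Int) (out : List Int) : Prop := out = reverse_even_elements_alt arr
instance (arr : List Int) (out : List Int) : Decidable (Spec_reverse_even_elements arr out) := by unfold Spec_reverse_even_elements; infer_instance

-- ===== CLAIM (what is proved, stated in full; the proofs are below) =====
def Claim_equal_reverse_even_elements : Prop := ∀ (arr : List Int), Dom_reverse_even_elements arr → Spec_reverse_even_elements arr (reverse_even_elements arr)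

-- ===== LEMMAS AND PROOFS =====

-- Positions (0-based) of even values, starting at offset s.
def epos : List Int → Nat → List Nat
  | [], _ => []
  | x :: xs, s => if pvEven x then s :: epos xs (s + 1) else epos xs (s + 1)

-- Window restriction [l, r].
def wnd (l r : Nat) (ps : List Nat) : List Nat :=
  ps.filter (fun p => decide (l ≤ p) && decide (p ≤ r))

-- B's write-back, as a function of the position table.
def wb (a : List Int) (ps : List Nat) : List Int :=
  (ps.zip ((ps.map (fun p => a.getD p 0)).reverse)).foldl (fun b pv => b.set pv.1 pv.2) a

-- A's loop with the two scan fronts as plain pointers.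
def pvLoop2 : Nat → List Int → Int → Int → List Int
  | 0, a, _, _ => a
  | c + 1, a, l, r =>
    let p := pvScanUp a l (a.length + 1)
    let q := pvScanDown a r (a.length + 1)
    if p = q then a
    else
      pvLoop2 c (PySem.List.pySetD (PySem.List.pySetD a p (PySem.List.pyGetD a q 0)) q
                  (PySem.List.pyGetD a p 0)) (p + 1) (q - 1)

theorem mem_epos (a : List Int) (s j : Nat) :
    j ∈ epos a s ↔ ∃ k, ∃ _ : k < a.length, j = s + k ∧ pvEven a[k] = true := by
  induction a generalizing s j with
  | nil => simp [epos]
  | cons x xs ih =>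
    by_cases hx : pvEven x = true
    · simp only [epos, hx, if_pos]
      constructor
      · intro hmem
        rcases List.mem_cons.1 hmem with h | h
        · exact ⟨0, by simp, by simpa using h, by simp [hx]⟩
        · obtain ⟨k, hk, hj, he⟩ := (ih (s+1) j).1 (by simpa using h)
          exact ⟨k+1, by simpa using hk, by omega, by simpa using he⟩
      · rintro ⟨k, hk, hj, he⟩
        cases k with
        | zero => exact List.mem_cons.2 (Or.inl (by omega))
        | succ k =>
          right
          exact (ih (s+1) j).2 ⟨k, by simpa using hk, by omega, by simpa using he⟩
    · simp only [epos, hx, if_neg, Bool.not_eq_true]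
      rw [ih (s+1) j]
      constructor
      · rintro ⟨k, hk, hj, he⟩
        exact ⟨k+1, by simpa using hk, by omega, by simpa using he⟩
      · rintro ⟨k, hk, hj, he⟩
        cases k with
        | zero => simp at he; exact absurd he hx
        | succ k => exact ⟨k, by simpa using hk, by omega, by simpa using he⟩

theorem mem_epos_zero (a : List Int) (j : Nat) :
    j ∈ epos a 0 ↔ ∃ _ : j < a.length, pvEven a[j] = true := by
  rw [mem_epos]
  constructor
  · rintro ⟨k, hk, hj, he⟩
    subst hj
    exact ⟨by simpa using hk, by simpa using he⟩
  · rintro ⟨hj, he⟩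
    exact ⟨j, hj, by omega, he⟩

theorem epos_pairwise (a : List Int) (s : Nat) : (epos a s).Pairwise (· < ·) := by
  induction a generalizing s with
  | nil => simp [epos]
  | cons x xs ih =>
    have hge : ∀ j ∈ epos xs (s+1), s < j := by
      intro j hj
      obtain ⟨k, hk, hj, -⟩ := (mem_epos xs (s+1) j).1 hj
      omega
    by_cases hx : pvEven x = true
    · simpa [epos, hx] using ⟨hge, ih (s+1)⟩
    · simpa [epos, hx] using ih (s+1)

theorem length_epos (a : List Int) (s : Nat) :
    (epos a s).length = (a.filter pvEven).length := by
  induction a generalizing s with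
  | nil => simp [epos]
  | cons x xs ih =>
    by_cases hx : pvEven x = true <;> simp [epos, hx, ih]

theorem epos_congr (a b : List Int) (s : Nat) (hlen : a.length = b.length)
    (h : ∀ k (ha : k < a.length) (hb : k < b.length), pvEven a[k] = pvEven b[k]) :
    epos a s = epos b s := by
  induction a generalizing b s with
  | nil => cases b with
    | nil => rfl
    | cons y ys => simp at hlen
  | cons x xs ih =>
    cases b with
    | nil => simp at hlen
    | cons y ys =>
      have h0 : pvEven x = pvEven y := h 0 (by simp) (by simp)
      have htl : epos xs (s+1) = epos ys (s+1) := by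
        refine ih ys (s+1) (by simpa using hlen) ?_
        intro k ha hb
        simpa using h (k+1) (by simpa using ha) (by simpa using hb)
      by_cases hx : pvEven x = true <;> simp [epos, hx, h0 ▸ hx, htl]

theorem scanUp_eq (a : List Int) (p : Nat) (hp : p < a.length) (hev : pvEven a[p] = true) :
    ∀ f (l : Nat), l ≤ p → (∀ j (h : j < a.length), l ≤ j → j < p → pvEven a[j] = false) →
      p - l < f → pvScanUp a (l : Int) f = (p : Int) := by
  intro f
  induction f with
  | zero => intro l _ _ h; omega
  | succ f ih =>
    intro l hlp hodd hfuel
    have hl : l < a.length := by omega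
    rw [pvScanUp, PySem.List.pyGet?_natCast, List.getElem?_eq_getElem hl]
    by_cases hle : l = p
    · subst hle; simp [hev]
    · have : pvEven a[l] = false := hodd l hl (le_refl l) (by omega)
      simp only [this, Bool.false_eq_true, if_false]
      have hc : ((l : Int) + 1) = ((l + 1 : Nat) : Int) := by push_cast; ring
      rw [hc]
      exact ih (l+1) (by omega) (fun j hj h1 h2 => hodd j hj (by omega) h2) (by omega)

theorem scanDown_eq (a : List Int) (q : Nat) (hq : q < a.length) (hev : pvEven a[q] = true) :
    ∀ f (r : Nat), q ≤ r → r < a.length →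
      (∀ j (h : j < a.length), q < j → j ≤ r → pvEven a[j] = false) →
      r - q < f → pvScanDown a (r : Int) f = (q : Int) := by
  intro f
  induction f with
  | zero => intro r _ _ _ h; omega
  | succ f ih =>
    intro r hqr hr hodd hfuel
    rw [pvScanDown, PySem.List.pyGet?_natCast, List.getElem?_eq_getElem hr]
    by_cases hre : r = q
    · subst hre; simp [hev]
    · have : pvEven a[r] = false := hodd r hr (by omega) (le_refl r)
      simp only [this, Bool.false_eq_true, if_false]
      have hc : ((r : Int) - 1) = ((r - 1 : Nat) : Int) := by omega
      rw [hc]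
      exact ih (r-1) (by omega) (by omega) (fun j hj h1 h2 => hodd j hj h1 (by omega)) (by omega)

theorem setFold_comm (prs : List (Nat × Int)) (q : Nat) (v : Int) :
    ∀ b : List Int, (∀ pv ∈ prs, pv.1 ≠ q) →
      prs.foldl (fun b pv => b.set pv.1 pv.2) (b.set q v) =
        (prs.foldl (fun b pv => b.set pv.1 pv.2) b).set q v := by
  induction prs with
  | nil => intro b _; rfl
  | cons pv prs ih =>
    intro b h
    have hne : pv.1 ≠ q := h pv (by simp)
    simp only [List.foldl_cons]
    rw [List.set_comm _ _ (Ne.symm hne)]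
    exact ih _ (fun x hx => h x (List.mem_cons_of_mem _ hx))

theorem wb_step (a : List Int) (p q : Nat) (mid : List Nat)
    
    (hmid : ∀ x ∈ mid, p < x ∧ x < q ∧ x < a.length) :
    wb a (p :: mid ++ [q]) = wb ((a.set p (a.getD q 0)).set q (a.getD p 0)) mid := by
  have h1 : ((p :: mid ++ [q]).map (fun j => a.getD j 0)).reverse
      = a.getD q 0 :: (mid.map (fun j => a.getD j 0)).reverse ++ [a.getD p 0] := by simp
  have hzip : (p :: mid ++ [q]).zip
        (a.getD q 0 :: (mid.map (fun j => a.getD j 0)).reverse ++ [a.getD p 0])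
      = (p, a.getD q 0) :: (mid.zip (mid.map (fun j => a.getD j 0)).reverse)
          ++ [(q, a.getD p 0)] := by
    show ((p :: mid) ++ [q]).zip
        ((a.getD q 0 :: (mid.map (fun j => a.getD j 0)).reverse) ++ [a.getD p 0]) = _
    rw [List.zip_append (by simp)]
    simp
  have hfst : ∀ pv ∈ mid.zip (mid.map (fun j => a.getD j 0)).reverse, pv.1 ≠ q := by
    intro pv hpv
    have := (List.of_mem_zip hpv).1
    exact Nat.ne_of_lt (hmid _ this).2.1
  have hvals : mid.map (fun j => ((a.set p (a.getD q 0)).set q (a.getD p 0)).getD j 0)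
      = mid.map (fun j => a.getD j 0) := by
    refine List.map_congr_left (fun x hx => ?_)
    obtain ⟨h1x, h2x, h3x⟩ := hmid x hx
    have hx' : x < ((a.set p (a.getD q 0)).set q (a.getD p 0)).length := by simpa using h3x
    rw [List.getD_eq_getElem _ 0 hx', List.getD_eq_getElem _ 0 h3x]
    simp [show ¬ q = x by omega, show ¬ p = x by omega]
  rw [wb, wb, h1, hzip, List.foldl_append, hvals]
  simp only [List.foldl_cons, List.foldl_nil]
  exact (setFold_comm _ q (a.getD p 0) _ hfst).symm

theorem loop2_eq_wb :
    ∀ c (a : List Int) (l r : Nat), r < a.length →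
      ((wnd l r (epos a 0)).length = 2 * c ∨ (wnd l r (epos a 0)).length = 2 * c + 1) →
      pvLoop2 c a (l : Int) (r : Int) = wb a (wnd l r (epos a 0)) := by
  intro c
  induction c with
  | zero =>
    intro a l r _ hlen
    have hlen1 : (wnd l r (epos a 0)).length ≤ 1 := by omega
    rw [pvLoop2]
    rcases hps : wnd l r (epos a 0) with _ | ⟨j, rest⟩
    · simp [wb]
    · rcases rest with _ | ⟨j2, rest⟩
      · have hj : j ∈ epos a 0 := by
          have hmem : j ∈ wnd l r (epos a 0) := by rw [hps]; simp
          exact List.mem_of_mem_filter hmem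
        obtain ⟨hjlen, -⟩ := (mem_epos_zero a j).1 hj
        simp [wb, List.getElem?_eq_getElem hjlen, List.set_getElem_self hjlen]
      · rw [hps] at hlen1; simp at hlen1
  | succ c ih =>
    intro a l r hr hlen
    -- the window has at least two even positions
    rcases hps : wnd l r (epos a 0) with _ | ⟨p, rest⟩
    · rw [hps] at hlen; simp at hlen
    have hrest : rest ≠ [] := by
      intro hnil
      rw [hps, hnil] at hlen; simp at hlen; omega
    set q := rest.getLast hrest with hqdef
    set mid := rest.dropLast with hmiddef
    have hdecomp : rest = mid ++ [q] := (List.dropLast_concat_getLast hrest).symm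
    -- membership and completeness facts for the window
    have hsub : ∀ j, j ∈ p :: rest → l ≤ j ∧ j ≤ r ∧ ∃ _ : j < a.length, pvEven a[j] = true := by
      intro j hj
      rw [← hps] at hj
      have h1 := List.of_mem_filter hj
      have h2 := (mem_epos_zero a j).1 (List.mem_of_mem_filter hj)
      simp only [Bool.and_eq_true, decide_eq_true_eq] at h1
      exact ⟨h1.1, h1.2, h2⟩
    have hcomplete : ∀ j (_ : j < a.length), pvEven a[j] = true → l ≤ j → j ≤ r → j ∈ p :: rest := by
      intro j hjl hje h1 h2
      rw [← hps]
      exact List.mem_filter.2 ⟨(mem_epos_zero a j).2 ⟨hjl, hje⟩, by simp [h1, h2]⟩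
    have hsort : (p :: rest).Pairwise (· < ·) := by
      rw [← hps]; exact List.Pairwise.filter _ (epos_pairwise a 0)
    have hprest : ∀ x ∈ rest, p < x := (List.pairwise_cons.1 hsort).1
    have hqmem : q ∈ rest := List.getLast_mem hrest
    have hpq : p < q := hprest q hqmem
    have hmidq : ∀ x ∈ mid, x < q := by
      intro x hx
      have := (List.pairwise_cons.1 hsort).2
      rw [hdecomp] at this
      exact (List.pairwise_append.1 this).2.2 x hx q (by simp)
    have hmidp : ∀ x ∈ mid, p < x := by
      intro x hx; exact hprest x (by rw [hdecomp]; exact List.mem_append_left _ hx)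
    obtain ⟨hlp, hpr, hplen, hpev⟩ := hsub p (by simp)
    obtain ⟨hlq, hqr, hqlen, hqev⟩ := hsub q (List.mem_cons_of_mem _ hqmem)
    -- the two while-scans find exactly p and q
    have hup : pvScanUp a (l : Int) (a.length + 1) = (p : Int) := by
      refine scanUp_eq a p hplen hpev (a.length + 1) l hlp ?_ (by omega)
      intro j hj h1 h2
      cases hje : pvEven a[j] with
      | false => rfl
      | true =>
        have hmem := hcomplete j hj hje h1 (by omega)
        rcases List.mem_cons.1 hmem with hh | hh
        · omega
        · have := hprest j hh; omega
    have hdown : pvScanDown a (r : Int) (a.length + 1) = (q : Int) := by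
      refine scanDown_eq a q hqlen hqev (a.length + 1) r hqr hr ?_ (by omega)
      intro j hj h1 h2
      cases hje : pvEven a[j] with
      | false => rfl
      | true =>
        have hmem := hcomplete j hj hje (by omega) h2
        rcases List.mem_cons.1 hmem with hh | hh
        · have := hprest q hqmem; omega
        · rw [hdecomp] at hh
          rcases List.mem_append.1 hh with hh | hh
          · have := hmidq j hh; omega
          · simp at hh; omega
    -- one unfolding of the loop: swap a[p] and a[q], recurse on the interior
    rw [pvLoop2]
    simp only [hup, hdown]
    rw [if_neg (by exact_mod_cast Nat.ne_of_lt hpq)]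
    simp only [PySem.List.pyGetD_natCast, PySem.List.pySetD_natCast]
    have hc1 : ((p : Int) + 1) = ((p + 1 : Nat) : Int) := by push_cast; ring
    have hc2 : ((q : Int) - 1) = ((q - 1 : Nat) : Int) := by omega
    rw [hc1, hc2]
    set a' := (a.set p (a.getD q 0)).set q (a.getD p 0) with ha'
    have hlen' : a'.length = a.length := by simp [ha']
    -- parity pattern is unchanged by the swap (both values are even)
    have hepos : epos a' 0 = epos a 0 := by
      refine epos_congr a' a 0 hlen' ?_
      intro k hka hkb
      have : a'[k] = if q = k then a.getD p 0 else if p = k then a.getD q 0 else a[k] := by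
        simp [ha', List.getElem_set]
      rw [this]
      by_cases hkq : q = k
      · subst hkq
        rw [if_pos rfl, List.getD_eq_getElem a 0 hplen, hpev, hqev]
      · rw [if_neg hkq]
        by_cases hkp : p = k
        · subst hkp
          rw [if_pos rfl, List.getD_eq_getElem a 0 hqlen, hqev, hpev]
        · rw [if_neg hkp]
    -- the interior window is exactly mid
    have hwnd : wnd (p + 1) (q - 1) (epos a' 0) = mid := by
      rw [hepos]
      have hbase : wnd (p + 1) (q - 1) (epos a 0)
          = (wnd l r (epos a 0)).filter (fun x => decide (p + 1 ≤ x) && decide (x ≤ q - 1)) := by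
        rw [wnd, wnd, List.filter_filter]
        refine (List.filter_congr (fun x hx => ?_)).symm
        cases hP : (decide (p + 1 ≤ x) && decide (x ≤ q - 1)) with
        | false => simp
        | true =>
          simp only [Bool.and_eq_true, decide_eq_true_eq] at hP
          simp [show l ≤ x by omega, show x ≤ r by omega]
      rw [hbase, hps, hdecomp]
      rw [List.filter_cons_of_neg (by simp), List.filter_append]
      rw [List.filter_eq_self.2 (fun x hx => by
        have h1x := hmidp x hx
        have h2x := hmidq x hx
        simp only [Bool.and_eq_true, decide_eq_true_eq]
        omega)]
      simp
      omega
    -- counts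
    have hmidlen : mid.length = 2 * c ∨ mid.length = 2 * c + 1 := by
      rw [hps, hdecomp] at hlen
      simp at hlen
      omega
    have hmid3 : ∀ x ∈ mid, p < x ∧ x < q ∧ x < a.length := by
      intro x hx
      refine ⟨hmidp x hx, hmidq x hx, ?_⟩
      obtain ⟨-, -, hxl, -⟩ := hsub x (by
        rw [hdecomp]; exact List.mem_cons_of_mem _ (List.mem_append_left _ hx))
      exact hxl
    rw [ih a' (p + 1) (q - 1) (by omega) (by rw [hwnd]; exact hmidlen), hwnd, hdecomp]
    exact (wb_step a p q mid hmid3).symm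

theorem loopA_eq_loop2 :
    ∀ c (a : List Int) (n i start endv : Int),
      pvLoopA a n c i start endv = pvLoop2 c a (i + start) (n - 1 - i - endv) := by
  intro c
  induction c with
  | zero => intro a n i start endv; rfl
  | succ c ih =>
    intro a n i start endv
    simp only [pvLoopA, pvLoop2]
    split_ifs with h
    · rfl
    · rw [ih]
      have e1 : (i + 1) + ((pvScanUp a (i + start) (a.length + 1)) - i) =
          pvScanUp a (i + start) (a.length + 1) + 1 := by ring
      have e2 : n - 1 - (i + 1) - (n - 1 - i - (pvScanDown a (n - 1 - i - endv) (a.length + 1))) =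
          pvScanDown a (n - 1 - i - endv) (a.length + 1) - 1 := by ring
      rw [e1, e2]

theorem enum_positions (a : List Int) :
    ∀ s : Nat, ((PySem.List.enumerate a (s : Int)).filter (fun ix => pvEven ix.2)).map (fun ix => ix.1) =
      (epos a s).map (fun p => (Int.ofNat p)) := by
  induction a with
  | nil => intro s; simp [PySem.List.enumerate_nil, epos]
  | cons x xs ih =>
    intro s
    have hc : ((s : Int) + 1) = ((s + 1 : Nat) : Int) := by push_cast; ring
    rw [PySem.List.enumerate_cons, hc]
    cases hx : pvEven x with
    | true => simp only [List.filter_cons, hx, if_true, List.map_cons, epos, ih (s+1)]; rfl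
    | false => simp only [List.filter_cons, hx, Bool.false_eq_true, if_false, epos, ih (s+1)]

theorem alt_eq_wb (arr : List Int) : reverse_even_elements_alt arr = wb arr (epos arr 0) := by
  have hpos := enum_positions arr 0
  rw [Nat.cast_zero] at hpos
  have h1 : (List.map (fun p => (Int.ofNat p)) (epos arr 0)).map (fun p => PySem.List.pyGetD arr p 0) =
      (epos arr 0).map (fun p => arr.getD p 0) := by
    rw [List.map_map]
    exact List.map_congr_left (fun p _ => by simp [Function.comp, PySem.List.pyGetD_natCast])
  have h2 : ∀ W : List Int,
      ((List.map (fun p => (Int.ofNat p)) (epos arr 0)).zip W).foldl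
          (fun b pv => PySem.List.pySetD b pv.1 pv.2) arr =
        ((epos arr 0).zip W).foldl (fun b pv => b.set pv.1 pv.2) arr := by
    intro W
    rw [List.zip_map_left, List.foldl_map]
    congr 1
    funext b pv
    simp [Prod.map]
  simp only [reverse_even_elements_alt]
  rw [hpos, h1, wb, h2]

-- ===== VERDICT (by name: the statement is the Claim_ definition above) =====
theorem reverse_even_elements_spec : Claim_equal_reverse_even_elements := by
  intro arr _
  unfold Spec_reverse_even_elements
  rw [alt_eq_wb]
  simp only [reverse_even_elements]
  rw [loopA_eq_loop2]
  by_cases harr : arr.length = 0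
  · have : arr = [] := List.length_eq_zero_iff.1 harr
    subst this
    rfl
  · have h0 : ((0 : Int) + 0) = ((0 : Nat) : Int) := by norm_num
    have h1 : ((arr.length : Int) - 1 - 0 - 0) = ((arr.length - 1 : Nat) : Int) := by omega
    rw [h0, h1]
    have hwndall : wnd 0 (arr.length - 1) (epos arr 0) = epos arr 0 := by
      apply List.filter_eq_self.2
      intro j hj
      obtain ⟨hjl, -⟩ := (mem_epos_zero arr j).1 hj
      simp only [Bool.and_eq_true, decide_eq_true_eq]
      omega
    rw [loop2_eq_wb _ arr 0 (arr.length - 1) (by omega)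
      (by rw [hwndall, length_epos]; omega), hwndall]
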